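-- pv_equiv track=rewrite | github.com/Quikks1lver/advent-of-code | 2025/day03.py | get_largest_left_most_num
-- ===== SOURCE A (Python) =====
-- from typing import List, Tuple
--
-- def get_largest_left_most_num(line: List[int], starting_left_index: int, starting_right_index: int) -> Tuple[int, int]:
--     # Sanity checks for bounds.
--     assert starting_left_index >= 0
--     assert starting_right_index < len(line)
--     assert starting_left_index <= starting_right_index
--
--     largest_val = line[starting_right_index]
--     largest_val_index = starting_right_index
--
--     for i in range(starting_right_index - 1, starting_left_index - 1, -1):
--         curr_val = line[i]
--         if curr_val >= largest_val:
--             largest_val = curr_val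
--             largest_val_index = i
--
--     return (largest_val_index, largest_val)
-- ===== SOURCE B (Python) =====
-- from typing import List, Tuple
--
-- def get_largest_left_most_num(line: List[int], starting_left_index: int, starting_right_index: int) -> Tuple[int, int]:
--     # Sanity checks for bounds.
--     assert starting_left_index >= 0
--     assert starting_right_index < len(line)
--     assert starting_left_index <= starting_right_index
--
--     window = line[starting_left_index:starting_right_index + 1]
--     largest_val = max(window)
--     return (starting_left_index + window.index(largest_val), largest_val)
-- ===== Notes on version B (the rewrite author's own statement) =====
-- stated objective: simpler
-- what changed: Replaces the fused right-to-left scan with leftmost-tie state by a slice plus two built-in passes: max(window) then window.index(max), which gives the leftmost maximum directly.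
import Mathlib
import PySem

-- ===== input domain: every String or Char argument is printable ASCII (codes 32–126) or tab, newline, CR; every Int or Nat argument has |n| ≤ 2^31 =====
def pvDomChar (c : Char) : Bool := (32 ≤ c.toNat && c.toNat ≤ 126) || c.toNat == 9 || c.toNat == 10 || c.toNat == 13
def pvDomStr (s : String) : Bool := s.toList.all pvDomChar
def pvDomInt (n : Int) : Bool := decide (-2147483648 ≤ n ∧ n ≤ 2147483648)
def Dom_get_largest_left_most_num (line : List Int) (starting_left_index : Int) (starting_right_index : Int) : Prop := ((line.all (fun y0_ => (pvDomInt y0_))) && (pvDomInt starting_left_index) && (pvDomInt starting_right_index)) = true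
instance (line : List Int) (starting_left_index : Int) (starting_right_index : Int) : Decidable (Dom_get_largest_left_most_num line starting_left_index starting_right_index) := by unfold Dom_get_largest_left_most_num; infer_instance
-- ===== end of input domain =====

-- B replaces A's fused right-to-left leftmost-max scan by a slice + max + first-index (simpler decomposition).

-- ===== PORT A =====
-- A's loop: scan i = r-1 down to l, keep current value on '>=', return (index, value).
def get_largest_left_most_num (line : List Int) (starting_left_index : Int) (starting_right_index : Int) : Int × Int :=
  let largest_val := PySem.List.pyGetD line starting_right_index 0
  let st := (PySem.List.pyRange (starting_right_index - 1) (starting_left_index - 1) (-1)).foldl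
    (fun (s : Int × Int) i =>
      let curr_val := PySem.List.pyGetD line i 0
      if curr_val ≥ s.1 then (curr_val, i) else s)
    (largest_val, starting_right_index)
  (st.2, st.1)

-- ===== PORT B =====
-- window = line[l:r+1]; m = max(window); return (l + window.index(m), m)
def get_largest_left_most_num_alt (line : List Int) (starting_left_index : Int) (starting_right_index : Int) : Int × Int :=
  let window := PySem.List.slice line (some starting_left_index) (some (starting_right_index + 1))
  let largest_val := (PySem.List.max? window (fun y => y)).getD 0
  (starting_left_index + ((PySem.List.index? window largest_val).getD 0 : Nat), largest_val)

-- ===== PRECONDITION & SPEC =====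
-- Pre_ is exactly A's three asserts; outside it A raises AssertionError.
def Pre_get_largest_left_most_num (line : List Int) (starting_left_index : Int) (starting_right_index : Int) : Prop :=
  0 ≤ starting_left_index ∧ starting_right_index < line.length ∧ starting_left_index ≤ starting_right_index
instance (line : List Int) (starting_left_index : Int) (starting_right_index : Int) : Decidable (Pre_get_largest_left_most_num line starting_left_index starting_right_index) := by unfold Pre_get_largest_left_most_num; infer_instance

def pvWitness_get_largest_left_most_num : List Int × Int × Int := ([3, 7, 7, 2], 0, 3)

def Spec_get_largest_left_most_num (line : List Int) (starting_left_index : Int) (starting_right_index : Int) (out : Int × Int) : Prop := out = get_largest_left_most_num_alt line starting_left_index starting_right_index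
instance (line : List Int) (starting_left_index : Int) (starting_right_index : Int) (out : Int × Int) : Decidable (Spec_get_largest_left_most_num line starting_left_index starting_right_index out) := by unfold Spec_get_largest_left_most_num; infer_instance

-- ===== CLAIM (what is proved, stated in full; the proofs are below) =====
def Claim_equal_get_largest_left_most_num : Prop := ∀ (line : List Int) (starting_left_index : Int) (starting_right_index : Int), Dom_get_largest_left_most_num line starting_left_index starting_right_index → Pre_get_largest_left_most_num line starting_left_index starting_right_index → Spec_get_largest_left_most_num line starting_left_index starting_right_index (get_largest_left_most_num line starting_left_index starting_right_index)

-- ===== LEMMAS AND PROOFS =====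

-- Python max(w) for a nonempty window, as B's port computes it.
def pyMaxW (w : List Int) : Int := (PySem.List.max? w (fun y => y)).getD 0

lemma pyMaxW_cons (x : Int) (t : List Int) : pyMaxW (x :: t) = t.foldl max x := by
  simp [pyMaxW, PySem.List.max?_id_cons]

lemma pyMaxW_cons_cons (x y : Int) (t : List Int) :
    pyMaxW (x :: y :: t) = max x (pyMaxW (y :: t)) := by
  simp [pyMaxW_cons, List.foldl_assoc]

lemma pyMaxW_mem (x : Int) (t : List Int) : pyMaxW (x :: t) ∈ x :: t := by
  have h : PySem.List.max? (x :: t) (fun y => y) = some (t.foldl max x) :=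
    PySem.List.max?_id_cons x t
  have := PySem.List.max?_mem h
  simpa [pyMaxW_cons] using this

lemma drop_eq_getD_cons (line : List Int) (j : Nat) (hj : j < line.length) :
    line.drop j = line.getD j 0 :: line.drop (j + 1) := by
  rw [List.drop_eq_getElem_cons hj]
  congr 1
  simp [List.getD, List.getElem?_eq_getElem hj]

-- window from index j to index r inclusive
def winW (line : List Int) (j r : Nat) : List Int := (line.drop j).take (r + 1 - j)

lemma winW_self (line : List Int) (r : Nat) (hr : r < line.length) :
    winW line r r = [line.getD r 0] := by
  have h1 : r + 1 - r = 1 := by omega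
  rw [winW, h1, drop_eq_getD_cons line r hr]
  simp

lemma winW_cons (line : List Int) (j r : Nat) (hj : j < r) (hr : r < line.length) :
    winW line j r = line.getD j 0 :: winW line (j + 1) r := by
  have hd := drop_eq_getD_cons line j (by omega)
  have h1 : r + 1 - j = (r - j) + 1 := by omega
  have h2 : r + 1 - (j + 1) = r - j := by omega
  simp [winW, hd, h1, h2]

lemma winW_ne_nil (line : List Int) (j r : Nat) (hj : j ≤ r) (hr : r < line.length) :
    winW line j r ≠ [] := by
  have : (winW line j r).length = r + 1 - j := by
    simp [winW]; omega
  intro h; rw [h] at this; simp at this; omega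

-- countdown range decomposition: range(a, b-1, -1) = range(a, b, -1) ++ [b]
lemma pyRange_neg_one_snoc (a b : Int) (hb : b ≤ a) :
    PySem.List.pyRange a (b - 1) (-1) = PySem.List.pyRange a b (-1) ++ [b] := by
  rw [PySem.List.pyRange_neg_one_eq_reverse, PySem.List.pyRange_neg_one_eq_reverse,
    PySem.List.pyRange_one_cons (by omega)]
  simp

-- A's loop step
def stepA (line : List Int) (s : Int × Int) (i : Int) : Int × Int :=
  let curr_val := PySem.List.pyGetD line i 0
  if curr_val ≥ s.1 then (curr_val, i) else s

-- main invariant: A's fold from r-1 down to j computes (max of window, leftmost argmax)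
lemma foldA_eq (line : List Int) (r : Nat) (hr : r < line.length) :
    ∀ (n j : Nat), j ≤ r → n = r - j →
    (PySem.List.pyRange ((r : Int) - 1) ((j : Int) - 1) (-1)).foldl (stepA line)
      (line.getD r 0, (r : Int))
    = (pyMaxW (winW line j r),
       (j : Int) + ((PySem.List.index? (winW line j r) (pyMaxW (winW line j r))).getD 0 : Nat)) := by
  intro n
  induction n with
  | zero =>
    intro j hjr hn
    have hjr' : j = r := by omega
    subst hjr'
    rw [PySem.List.pyRange_neg_one_eq_nil (by omega), winW_self line j hr]
    rw [show pyMaxW [line.getD j 0] = line.getD j 0 from by rw [pyMaxW_cons]; rfl]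
    rw [PySem.List.index?_cons_self]
    simp
  | succ n ih =>
    intro j hjr hn
    have hjlt : j < r := by omega
    have hsnoc : PySem.List.pyRange ((r : Int) - 1) ((j : Int) - 1) (-1)
        = PySem.List.pyRange ((r : Int) - 1) ((j : Int)) (-1) ++ [(j : Int)] :=
      pyRange_neg_one_snoc _ _ (by omega)
    have ihj := ih (j + 1) (by omega) (by omega)
    rw [show ((j + 1 : Nat) : Int) - 1 = (j : Int) by push_cast; ring] at ihj
    rw [hsnoc, List.foldl_append, ihj]
    have hwc := winW_cons line j r hjlt hr
    have hget : PySem.List.pyGetD line ((j : Nat) : Int) 0 = line.getD j 0 :=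
      PySem.List.pyGetD_natCast line j 0
    obtain ⟨y, t, hw'⟩ : ∃ y t, winW line (j + 1) r = y :: t := by
      cases h : winW line (j + 1) r with
      | nil => exact absurd h (winW_ne_nil line (j + 1) r (by omega) hr)
      | cons y t => exact ⟨y, t, rfl⟩
    simp only [List.foldl_cons, List.foldl_nil, stepA, hget]
    by_cases hcase : line.getD j 0 ≥ pyMaxW (winW line (j + 1) r)
    · rw [if_pos hcase]
      have hmax : pyMaxW (winW line j r) = line.getD j 0 := by
        rw [hwc, hw', pyMaxW_cons_cons]
        rw [hw'] at hcase
        omega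
      rw [hmax, hwc, PySem.List.index?_cons_self]
      simp
    · rw [if_neg hcase]
      have hmax : pyMaxW (winW line j r) = pyMaxW (winW line (j + 1) r) := by
        rw [hwc, hw', pyMaxW_cons_cons, ← hw']
        rw [hw'] at hcase ⊢
        omega
      have hne : line.getD j 0 ≠ pyMaxW (winW line (j + 1) r) := by
        rw [hw'] at hcase ⊢; omega
      have hmem : pyMaxW (winW line (j + 1) r) ∈ winW line (j + 1) r := by
        rw [hw']; exact pyMaxW_mem y t
      obtain ⟨k, hk⟩ : ∃ k, PySem.List.index? (winW line (j + 1) r)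
          (pyMaxW (winW line (j + 1) r)) = some k :=
        Option.isSome_iff_exists.mp ((PySem.List.index?_isSome_iff _ _).mpr hmem)
      have hidx : PySem.List.index? (winW line j r) (pyMaxW (winW line (j + 1) r))
          = some (k + 1) := by
        rw [hwc, PySem.List.index?_cons_of_ne _ hne, hk]; rfl
      rw [hmax, hidx, hk]
      simp only [Option.getD_some, Prod.mk.injEq, true_and]
      push_cast
      ring

-- ===== VERDICT (by name: the statement is the Claim_ definition above) =====
theorem get_largest_left_most_num_spec : Claim_equal_get_largest_left_most_num := by
  intro line l r _hdom hpre
  obtain ⟨hl, hr, hlr⟩ := hpre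
  unfold Spec_get_largest_left_most_num get_largest_left_most_num get_largest_left_most_num_alt
  have hlc : l = ((l.toNat : Nat) : Int) := (Int.toNat_of_nonneg hl).symm
  have hrc : r = ((r.toNat : Nat) : Int) := (Int.toNat_of_nonneg (by omega)).symm
  rw [hlc, hrc]
  set ln := l.toNat with hln
  set rn := r.toNat with hrn
  have hrlen : rn < line.length := by omega
  have hslice : PySem.List.slice line (some ((ln : Nat) : Int)) (some (((rn : Nat) : Int) + 1))
      = winW line ln rn := by
    rw [PySem.List.slice_toNat line (by omega) (by omega)]
    have h1 : ((ln : Int)).toNat = ln := by omega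
    have h2 : (((rn : Int)) + 1).toNat = rn + 1 := by omega
    rw [h1, h2, winW]
  have hget : PySem.List.pyGetD line ((rn : Nat) : Int) 0 = line.getD rn 0 :=
    PySem.List.pyGetD_natCast line rn 0
  have hfun : (fun (s : Int × Int) i =>
      if PySem.List.pyGetD line i 0 ≥ s.1 then (PySem.List.pyGetD line i 0, i) else s)
      = stepA line := rfl
  simp only [hslice, hget, hfun]
  rw [foldA_eq line rn hrlen (rn - ln) ln (by omega) rfl]
  rfl
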